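-- pv_equiv track=rewrite | github.com/MateuszGraja/cryptography | Lab1.py | extended_series
-- ===== SOURCE A (Python) =====
-- def extended_series(bits):
--     max_run = 1
--     current_run = 1
--     for i in range(1, len(bits)):
--         if bits[i] == bits[i-1]:
--             current_run += 1
--         else:
--             if current_run > max_run:
--                 max_run = current_run
--             current_run = 1
--     max_run = max(current_run, max_run)
--     result = max_run < 26
--     return result
-- ===== SOURCE B (Python) =====
-- def extended_series(bits):
--     runs = []  # run-length encoding of bits: (value, length) per maximal run
--     for x in bits:
--         if runs and runs[-1][0] == x:
--             runs[-1] = (x, runs[-1][1] + 1)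
--         else:
--             runs.append((x, 1))
--     return all(n < 26 for _, n in runs)
-- ===== Notes on version B (the rewrite author's own statement) =====
-- stated objective: alternative
-- what changed: B builds the run-length encoding of the bit sequence in one pass and then returns all(n < 26 for the run lengths), replacing A's incremental max_run/current_run state machine over adjacent indices.
import Mathlib
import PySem

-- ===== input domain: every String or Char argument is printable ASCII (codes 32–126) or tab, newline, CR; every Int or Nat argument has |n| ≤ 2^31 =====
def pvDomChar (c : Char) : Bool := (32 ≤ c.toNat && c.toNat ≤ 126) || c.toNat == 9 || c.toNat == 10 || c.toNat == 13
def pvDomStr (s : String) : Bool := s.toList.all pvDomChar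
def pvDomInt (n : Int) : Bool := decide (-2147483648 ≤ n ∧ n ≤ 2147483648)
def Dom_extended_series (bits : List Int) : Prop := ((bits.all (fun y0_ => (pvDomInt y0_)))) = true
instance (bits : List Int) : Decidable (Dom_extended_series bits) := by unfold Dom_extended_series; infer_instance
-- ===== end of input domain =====

-- B replaces A's incremental max_run/current_run state machine by building the run-length
-- encoding of the sequence and then checking every run length with all(...) (objective: alternative).

-- ===== PORT A =====
def extended_series (bits : List Int) : Bool :=
  let st :=
    (PySem.List.pyRange 1 (PySem.List.len bits) 1).foldl
      (fun (st : Int × Int) i =>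
        if PySem.List.pyGetD bits i 0 = PySem.List.pyGetD bits (i - 1) 0 then
          (st.1, st.2 + 1)
        else
          ((if st.2 > st.1 then st.2 else st.1), 1))
      (1, 1)
  let max_run := max st.2 st.1
  decide (max_run < 26)

-- ===== PORT B =====
-- one loop iteration of Source B: extend the last run or start a new one
def extended_series_alt_step (runs : List (Int × Int)) (x : Int) : List (Int × Int) :=
  match runs.getLast? with
  | some (v, n) => if v = x then runs.dropLast ++ [(v, n + 1)] else runs ++ [(x, 1)]
  | none => runs ++ [(x, 1)]

def extended_series_alt (bits : List Int) : Bool :=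
  let runs := bits.foldl extended_series_alt_step []
  runs.all (fun p => decide (p.2 < 26))

-- ===== PRECONDITION & SPEC =====
def Spec_extended_series (bits : List Int) (out : Bool) : Prop := out = extended_series_alt bits
instance (bits : List Int) (out : Bool) : Decidable (Spec_extended_series bits out) := by unfold Spec_extended_series; infer_instance

-- ===== CLAIM (what is proved, stated in full; the proofs are below) =====
def Claim_equal_extended_series : Prop := ∀ (bits : List Int), Dom_extended_series bits → Spec_extended_series bits (extended_series bits)

-- ===== LEMMAS AND PROOFS =====

-- A's loop body as a structural recursion over the suffix still to be scanned
def goA (prev : Int) (st : Int × Int) : List Int → Int × Int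
  | [] => st
  | y :: ys =>
      if y = prev then goA y (st.1, st.2 + 1) ys
      else goA y ((if st.2 > st.1 then st.2 else st.1), 1) ys

lemma drop_getD (bits : List Int) (k : Nat) (p : Int) (rest : List Int)
    (h : bits.drop k = p :: rest) : bits.getD k 0 = p := by
  have h1 := List.getElem?_drop (xs := bits) (i := k) (j := 0)
  rw [h] at h1
  simp only [List.getElem?_cons_zero, Nat.add_zero] at h1
  simp [List.getD_eq_getElem?_getD, ← h1]

lemma loopA_eq_goA (suffix : List Int) : ∀ (bits : List Int) (prev : Int) (a : Int)
    (st : Int × Int), 0 < a → bits.drop (a.toNat - 1) = prev :: suffix →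
    (PySem.List.pyRange a (bits.length : Int) 1).foldl
      (fun (st : Int × Int) i =>
        if PySem.List.pyGetD bits i 0 = PySem.List.pyGetD bits (i - 1) 0 then
          (st.1, st.2 + 1)
        else ((if st.2 > st.1 then st.2 else st.1), 1)) st
      = goA prev st suffix := by
  induction suffix with
  | nil =>
      intro bits prev a st ha hdrop
      have hlen : bits.length = a.toNat := by
        have := congrArg List.length hdrop
        simp at this
        omega
      rw [PySem.List.pyRange_one_eq_nil (by omega : (bits.length : Int) ≤ a)]
      simp [goA]
  | cons y ys ih =>
      intro bits prev a st ha hdrop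
      have hlen : a.toNat - 1 + 2 ≤ bits.length := by
        have := congrArg List.length hdrop
        simp at this
        omega
      have hlt : a < (bits.length : Int) := by omega
      rw [PySem.List.pyRange_one_cons hlt, List.foldl_cons]
      have hdy : bits.drop a.toNat = y :: ys := by
        have : bits.drop (a.toNat - 1 + 1) = y :: ys := by
          rw [← List.drop_drop]; simp [hdrop]
        have hnn : a.toNat - 1 + 1 = a.toNat := by omega
        rwa [hnn] at this
      have hy : PySem.List.pyGetD bits a 0 = y := by
        rw [PySem.List.pyGetD_of_nonneg bits 0 (by omega)]
        exact drop_getD bits a.toNat y ys hdy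
      have hp : PySem.List.pyGetD bits (a - 1) 0 = prev := by
        rw [PySem.List.pyGetD_of_nonneg bits 0 (by omega)]
        have : (a - 1).toNat = a.toNat - 1 := by omega
        rw [this]
        exact drop_getD bits (a.toNat - 1) prev (y :: ys) hdrop
      rw [hy, hp]
      have hdrop' : bits.drop ((a + 1).toNat - 1) = y :: ys := by
        have : (a + 1).toNat - 1 = a.toNat := by omega
        rw [this]; exact hdy
      by_cases hcase : y = prev
      · subst hcase
        simp only [goA, reduceIte]
        exact ih bits y (a + 1) _ (by omega) hdrop'
      · simp only [goA, if_neg hcase]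
        exact ih bits y (a + 1) _ (by omega) hdrop'

-- key invariant: max of the run lengths built by B equals A's state machine result
lemma key (ys : List Int) : ∀ (rs : List (Int × Int)) (prev c m : Int),
    ((List.foldl extended_series_alt_step (rs ++ [(prev, c)]) ys).map (·.2)).foldl max m
      = max (goA prev ((rs.map (·.2)).foldl max m, c) ys).2
          (goA prev ((rs.map (·.2)).foldl max m, c) ys).1 := by
  induction ys with
  | nil =>
      intro rs prev c m
      simp [goA, List.foldl_append]
      omega
  | cons y ys ih =>
      intro rs prev c m
      simp only [List.foldl_cons, extended_series_alt_step, List.getLast?_concat,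
        List.dropLast_concat]
      by_cases hcase : prev = y
      · subst hcase
        simp only [goA, reduceIte]
        exact ih rs prev (c + 1) m
      · have hy : ¬ y = prev := fun h => hcase h.symm
        simp only [goA, if_neg hcase, if_neg hy]
        have h2 := ih (rs ++ [(prev, c)]) y 1 m
        rw [h2]
        have h3 : ((rs ++ [(prev, c)]).map (·.2)).foldl max m
            = (if c > (rs.map (·.2)).foldl max m then c else (rs.map (·.2)).foldl max m) := by
          simp [List.foldl_append]
          omega
        rw [h3]

lemma foldl_max_lt (k : Int) (l : List Int) : ∀ (m : Int),
    (l.foldl max m < k ↔ m < k ∧ ∀ v ∈ l, v < k) := by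
  induction l with
  | nil => intro m; simp
  | cons x xs ih =>
      intro m
      rw [List.foldl_cons, ih]
      constructor
      · rintro ⟨h1, h2⟩
        refine ⟨by omega, ?_⟩
        intro v hv
        rcases List.mem_cons.mp hv with h | h
        · omega
        · exact h2 v h
      · rintro ⟨h1, h2⟩
        exact ⟨by have := h2 x (by simp); omega, fun v hv => h2 v (by simp [hv])⟩

lemma all_eq_foldl_max (runs : List (Int × Int)) :
    runs.all (fun p => decide (p.2 < 26)) = decide ((runs.map (·.2)).foldl max 1 < 26) := by
  rw [Bool.eq_iff_iff]
  simp only [List.all_eq_true, decide_eq_true_eq]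
  rw [foldl_max_lt]
  constructor
  · intro h; exact ⟨by omega, fun v hv => by
      rcases List.mem_map.mp hv with ⟨p, hp, rfl⟩; exact h p hp⟩
  · rintro ⟨-, h⟩ p hp; exact h p.2 (List.mem_map.mpr ⟨p, hp, rfl⟩)

-- ===== VERDICT (by name: the statement is the Claim_ definition above) =====
theorem extended_series_spec : Claim_equal_extended_series := by
  intro bits _
  unfold Spec_extended_series extended_series extended_series_alt
  cases bits with
  | nil =>
      simp [PySem.List.pyRange_one_eq_nil, PySem.List.len]
  | cons x xs =>
      simp only [PySem.List.len_eq]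
      have hF := loopA_eq_goA xs (x :: xs) x 1 (1, 1) (by omega) (by simp)
      have hkey := key xs [] x 1 1
      simp only [List.map_nil, List.foldl_nil, List.nil_append] at hkey
      have hstep : extended_series_alt_step [] x = [(x, 1)] := by
        simp [extended_series_alt_step]
      simp only [hF, List.foldl_cons, hstep, all_eq_foldl_max]
      rw [Bool.eq_iff_iff]
      simp only [decide_eq_true_eq]
      rw [hkey]
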